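-- pv_equiv track=rewrite | github.com/KevinRothi/ProjectEurlerProblems | reciprocalcycles.py | length_of_pattern
-- ===== SOURCE A (Python) =====
-- def length_of_pattern(pattern):
-- 	longest = 0
-- 	to_match = ''
-- 	for i in range(0, len(pattern)):
-- 		to_match = pattern[i]
-- 		for j in range(i+1, len(pattern)):
-- 			to_match += pattern[j]
-- 			if to_match == pattern[j+1:j+1+len(to_match)]:
-- 				if (len(to_match) > longest):
-- 					longest = len(to_match)
-- 				break
-- 	return longest
-- ===== SOURCE B (Python) =====
-- def length_of_pattern(pattern):
-- 	n = len(pattern)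
-- 	longest = 0
-- 	row = [0] * (n + 1)
-- 	for i in range(n - 1, -1, -1):
-- 		nxt = row
-- 		row = [nxt[j + 1] + 1 if pattern[i] == pattern[j] else 0 for j in range(n)] + [0]
-- 		for L in range(2, (n - i) // 2 + 1):
-- 			if row[i + L] >= L:
-- 				if L > longest:
-- 					longest = L
-- 				break
-- 	return longest
-- ===== Notes on version B (the rewrite author's own statement) =====
-- stated objective: faster
-- what changed: Replaces A's incremental block growing with O(L) string/slice comparisons per step by a right-to-left suffix-LCP dynamic-programming row (lcp(i,j)=lcp(i+1,j+1)+1 if chars match), so each block-repetition test becomes a single O(1) table lookup row[i+L] >= L and the candidate range per start shrinks to (n-i)//2.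
import Mathlib
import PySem

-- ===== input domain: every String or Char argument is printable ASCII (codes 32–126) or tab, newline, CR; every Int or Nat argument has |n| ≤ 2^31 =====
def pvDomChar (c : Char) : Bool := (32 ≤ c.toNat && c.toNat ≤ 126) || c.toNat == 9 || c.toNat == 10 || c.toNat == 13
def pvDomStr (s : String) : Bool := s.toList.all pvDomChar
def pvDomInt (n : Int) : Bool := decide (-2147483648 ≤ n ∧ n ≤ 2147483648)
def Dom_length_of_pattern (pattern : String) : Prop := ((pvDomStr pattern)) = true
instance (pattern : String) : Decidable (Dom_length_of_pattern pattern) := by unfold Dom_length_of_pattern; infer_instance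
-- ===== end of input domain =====

-- B replaces A's repeated slice comparisons by a right-to-left suffix-LCP DP row, making
-- each repetition test a single table lookup (measured faster in a timing run).

-- ===== PORT A =====
-- inner 'for j in range(i+1, len(pattern))' loop with its break, as structural recursion
def pvInnerA (s : List Char) (longest : Int) (toMatch : List Char) : List Int → Int
  | [] => longest
  | j :: js =>
    let tm := toMatch ++ [PySem.List.pyGetD s j ' ']
    if tm = PySem.List.slice s (some (j + 1)) (some (j + 1 + (tm.length : Int))) then
      if (tm.length : Int) > longest then (tm.length : Int) else longest
    else pvInnerA s longest tm js

def length_of_pattern (pattern : String) : Int :=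
  let s := pattern.toList
  let n : Int := (s.length : Int)
  (PySem.List.pyRange 0 n 1).foldl
    (fun longest i =>
      pvInnerA s longest [PySem.List.pyGetD s i ' '] (PySem.List.pyRange (i + 1) n 1))
    0

-- ===== PORT B =====
-- inner 'for L in range(2, (n-i)//2 + 1)' loop with its break, as structural recursion
def pvInnerB (row : List Int) (i : Int) (longest : Int) : List Int → Int
  | [] => longest
  | L :: Ls =>
    if PySem.List.pyGetD row (i + L) 0 ≥ L then
      if L > longest then L else longest
    else pvInnerB row i longest Ls

def length_of_pattern_alt (pattern : String) : Int :=
  let s := pattern.toList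
  let n : Int := (s.length : Int)
  let res := (PySem.List.pyRange (n - 1) (-1) (-1)).foldl
    (fun (st : Int × List Int) i =>
      let nxt := st.2
      let row := ((PySem.List.pyRange 0 n 1).map
          (fun j => if PySem.List.pyGetD s i ' ' = PySem.List.pyGetD s j ' '
                    then PySem.List.pyGetD nxt (j + 1) 0 + 1 else 0)) ++ [0]
      let longest := pvInnerB row i st.1
        (PySem.List.pyRange 2 (PySem.Int.floordiv (n - i) 2 + 1) 1)
      (longest, row))
    (0, List.replicate (s.length + 1) 0)
  res.1

-- ===== PRECONDITION & SPEC =====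
def Spec_length_of_pattern (pattern : String) (out : Int) : Prop := out = length_of_pattern_alt pattern
instance (pattern : String) (out : Int) : Decidable (Spec_length_of_pattern pattern out) := by unfold Spec_length_of_pattern; infer_instance

-- ===== CLAIM (what is proved, stated in full; the proofs are below) =====
def Claim_equal_length_of_pattern : Prop := ∀ (pattern : String), Dom_length_of_pattern pattern → Spec_length_of_pattern pattern (length_of_pattern pattern)

-- ===== LEMMAS AND PROOFS =====

-- length of the longest common prefix of two character lists (proof-side helper)
def lcpCh : List Char → List Char → Nat
  | a :: u, b :: v => if a = b then lcpCh u v + 1 else 0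
  | _, _ => 0

-- the success predicate both inner loops test, on (start index, block length)
def Pb (s : List Char) (i L : Nat) : Bool :=
  decide (i + 2 * L ≤ s.length) && decide ((s.drop i).take L = (s.drop (i + L)).take L)

-- per-start contribution step shared by both outer loops
def gstep (s : List Char) (lg : Int) (i : Nat) : Int :=
  match (List.range' 2 ((s.length - i) / 2 - 1)).find? (Pb s i) with
  | some L => max lg (L : Int)
  | none => lg

-- the lcp row B maintains for start index i
def rowFor (s : List Char) (i : Nat) : List Int :=
  (List.range (s.length + 1)).map (fun j => ((lcpCh (s.drop i) (s.drop j) : Nat) : Int))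

theorem lcpCh_nil_left (v : List Char) : lcpCh [] v = 0 := by cases v <;> rfl

theorem lcpCh_nil_right (u : List Char) : lcpCh u [] = 0 := by cases u <;> rfl

theorem lcp_ge_iff : ∀ (L : Nat) (u v : List Char),
    L ≤ lcpCh u v ↔ L ≤ u.length ∧ L ≤ v.length ∧ u.take L = v.take L := by
  intro L
  induction L with
  | zero => intro u v; simp
  | succ L ih =>
    intro u v
    cases u with
    | nil => simp [lcpCh_nil_left]
    | cons a u =>
      cases v with
      | nil => simp [lcpCh_nil_right]
      | cons b v =>
        by_cases hab : a = b
        · subst hab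
          simp [lcpCh, ih]
        · simp [lcpCh, hab]

theorem lcpCh_drop (s : List Char) (i j : Nat) (hi : i < s.length) (hj : j < s.length) :
    lcpCh (s.drop i) (s.drop j) =
      if s[i] = s[j] then lcpCh (s.drop (i + 1)) (s.drop (j + 1)) + 1 else 0 := by
  rw [List.drop_eq_getElem_cons hi, List.drop_eq_getElem_cons hj]; rfl

theorem rowFor_pyGetD (s : List Char) (i j : Nat) (h : j < s.length + 1) :
    PySem.List.pyGetD (rowFor s i) (j : Int) 0 = ((lcpCh (s.drop i) (s.drop j) : Nat) : Int) := by
  rw [PySem.List.pyGetD_ofNat _ _ _ (by simp [rowFor]; omega)]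
  simp [rowFor]

theorem rowFor_top (s : List Char) : rowFor s s.length = List.replicate (s.length + 1) 0 := by
  simp [rowFor]

theorem rowStep (s : List Char) (i : Nat) (hi : i < s.length) :
    ((PySem.List.pyRange 0 (s.length : Int) 1).map
      (fun j => if PySem.List.pyGetD s (i : Int) ' ' = PySem.List.pyGetD s j ' '
                then PySem.List.pyGetD (rowFor s (i + 1)) (j + 1) 0 + 1 else 0)) ++ [0]
    = rowFor s i := by
  rw [PySem.List.pyRange_zero_nat, List.map_map]
  have hr : rowFor s i = (List.range s.length).map
      (fun j => ((lcpCh (s.drop i) (s.drop j) : Nat) : Int))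
      ++ [((lcpCh (s.drop i) (s.drop s.length) : Nat) : Int)] := by
    rw [rowFor, List.range_succ, List.map_append]; rfl
  rw [hr]
  congr 1
  · apply List.map_congr_left
    intro j hj
    have hjn : j < s.length := List.mem_range.mp hj
    have h1 : PySem.List.pyGetD s (i : Int) ' ' = s[i] := PySem.List.pyGetD_ofNat s i ' ' hi
    have h2 : PySem.List.pyGetD s (j : Int) ' ' = s[j] := PySem.List.pyGetD_ofNat s j ' ' hjn
    have h3 : ((j : Int) + 1) = ((j + 1 : Nat) : Int) := by push_cast; ring
    simp only [Function.comp_apply, h1, h2, h3,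
      rowFor_pyGetD s (i + 1) (j + 1) (by omega)]
    rw [lcpCh_drop s i j hi hjn]
    split <;> push_cast <;> ring
  · simp [List.drop_length, lcpCh_nil_right]

theorem row_cond (s : List Char) (i L : Nat) (hi : i < s.length) (hL2 : 2 ≤ L)
    (hLb : L ≤ (s.length - i) / 2) :
    (PySem.List.pyGetD (rowFor s i) ((i : Int) + (L : Int)) 0 ≥ (L : Int)) ↔ Pb s i L = true := by
  have h2L : 2 * L ≤ s.length - i := by omega
  have hcast : ((i : Int) + (L : Int)) = ((i + L : Nat) : Int) := by push_cast; ring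
  rw [hcast, rowFor_pyGetD s i (i + L) (by omega)]
  rw [ge_iff_le, Int.ofNat_le, lcp_ge_iff]
  simp only [List.length_drop]
  unfold Pb
  simp only [Bool.and_eq_true, decide_eq_true_eq]
  constructor
  · rintro ⟨-, -, h⟩; exact ⟨by omega, h⟩
  · rintro ⟨-, h⟩; exact ⟨by omega, by omega, h⟩

theorem slice_cond (s : List Char) (i m : Nat) (him : i ≤ m) (hm : m < s.length) :
    ((s.drop i).take (m + 1 - i)
       = PySem.List.slice s (some ((m : Int) + 1)) (some ((m : Int) + 1 + ((m + 1 - i : Nat) : Int))))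
      ↔ Pb s i (m + 1 - i) = true := by
  have hc : ((m : Int) + 1) = ((m + 1 : Nat) : Int) := by push_cast; ring
  rw [hc, PySem.List.slice_natCast_add s (m + 1) (m + 1 - i)]
  unfold Pb
  simp only [Bool.and_eq_true, decide_eq_true_eq]
  have hidx : i + (m + 1 - i) = m + 1 := by omega
  rw [hidx]
  constructor
  · intro h
    refine ⟨?_, h⟩
    have := congrArg List.length h
    simp only [List.length_take, List.length_drop] at this
    omega
  · exact fun h => h.2

theorem innerA_go (s : List Char) (i : Nat) (lg : Int) :
    ∀ (k m : Nat), i < m → m + k = s.length →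
    pvInnerA s lg ((s.drop i).take (m - i)) (PySem.List.pyRange (m : Int) (s.length : Int) 1)
      = match (List.range' (m + 1 - i) k).find? (Pb s i) with
        | some L => max lg (L : Int)
        | none => lg := by
  intro k
  induction k with
  | zero =>
    intro m him hmk
    rw [PySem.List.pyRange_one_eq_nil (by omega)]
    simp [pvInnerA]
  | succ k ih =>
    intro m him hmk
    have hm : m < s.length := by omega
    rw [PySem.List.pyRange_one_cons (by exact_mod_cast hm)]
    have htm' : (s.drop i).take (m - i) ++ [PySem.List.pyGetD s (m : Int) ' ']
        = (s.drop i).take (m + 1 - i) := by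
      rw [PySem.List.pyGetD_ofNat s m ' ' hm]
      have : m + 1 - i = (m - i) + 1 := by omega
      rw [this, List.take_add_one]
      congr 1
      rw [List.getElem?_drop]
      have : i + (m - i) = m := by omega
      rw [this, List.getElem?_eq_getElem hm]
      rfl
    have hlen : ((s.drop i).take (m + 1 - i)).length = m + 1 - i := by
      simp [List.length_take, List.length_drop]; omega
    simp only [pvInnerA, htm', hlen]
    by_cases hc : Pb s i (m + 1 - i) = true
    · rw [if_pos ((slice_cond s i m (by omega) hm).mpr hc)]
      rw [List.range'_succ, List.find?_cons_of_pos (p := Pb s i) hc]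
      show (if ((m + 1 - i : Nat) : Int) > lg then ((m + 1 - i : Nat) : Int) else lg)
        = max lg ((m + 1 - i : Nat) : Int)
      split <;> omega
    · rw [if_neg (fun h => hc ((slice_cond s i m (by omega) hm).mp h))]
      rw [List.range'_succ, List.find?_cons_of_neg (p := Pb s i) (by simpa using hc)]
      have hc1 : ((m : Int) + 1) = ((m + 1 : Nat) : Int) := by push_cast; ring
      rw [hc1, ih (m + 1) (by omega) (by omega)]
      have : m + 1 + 1 - i = m + 1 - i + 1 := by omega
      rw [this]

theorem find?_cutoff (s : List Char) (i : Nat) (hi : i < s.length) :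
    (List.range' 2 (s.length - i - 1)).find? (Pb s i)
      = (List.range' 2 ((s.length - i) / 2 - 1)).find? (Pb s i) := by
  rw [show s.length - i - 1
        = ((s.length - i) / 2 - 1) + ((s.length - i - 1) - ((s.length - i) / 2 - 1)) by omega,
      ← List.range'_append_1, List.find?_append]
  have hnone : (List.range' (2 + ((s.length - i) / 2 - 1))
      (s.length - i - 1 - ((s.length - i) / 2 - 1))).find? (Pb s i) = none := by
    rw [List.find?_eq_none]
    intro x hx
    rw [List.mem_range'_1] at hx
    have hgt : ¬ (i + 2 * x ≤ s.length) := by omega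
    simp [Pb, hgt]
  rw [hnone, Option.or_none]

theorem innerA_spec (s : List Char) (i : Nat) (lg : Int) (hi : i < s.length) :
    pvInnerA s lg [PySem.List.pyGetD s (i : Int) ' ']
        (PySem.List.pyRange ((i : Int) + 1) (s.length : Int) 1)
      = gstep s lg i := by
  have h1 : [PySem.List.pyGetD s (i : Int) ' '] = (s.drop i).take ((i + 1) - i) := by
    rw [PySem.List.pyGetD_ofNat s i ' ' hi]
    rw [List.drop_eq_getElem_cons hi, show i + 1 - i = 1 by omega]
    rfl
  have h2 : ((i : Int) + 1) = ((i + 1 : Nat) : Int) := by push_cast; ring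
  rw [h1, h2, innerA_go s i lg (s.length - i - 1) (i + 1) (by omega) (by omega)]
  rw [show i + 1 + 1 - i = 2 by omega, find?_cutoff s i hi]
  rfl

theorem innerB_go (s : List Char) (i : Nat) (lg : Int) (hi : i < s.length) :
    ∀ (k L0 : Nat), 2 ≤ L0 → L0 + k = (s.length - i) / 2 + 1 →
    pvInnerB (rowFor s i) (i : Int) lg
        (PySem.List.pyRange (L0 : Int) (((s.length - i) / 2 + 1 : Nat) : Int) 1)
      = match (List.range' L0 k).find? (Pb s i) with
        | some L => max lg (L : Int)
        | none => lg := by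
  intro k
  induction k with
  | zero =>
    intro L0 hL0 hk
    rw [PySem.List.pyRange_one_eq_nil
      (by exact_mod_cast (by omega : (s.length - i) / 2 + 1 ≤ L0))]
    simp [pvInnerB]
  | succ k ih =>
    intro L0 hL0 hk
    have hlt : L0 < (s.length - i) / 2 + 1 := by omega
    rw [PySem.List.pyRange_one_cons (by exact_mod_cast hlt)]
    simp only [pvInnerB]
    rw [List.range'_succ]
    by_cases hc : Pb s i L0 = true
    · rw [if_pos ((row_cond s i L0 hi hL0 (by omega)).mpr hc)]
      rw [List.find?_cons_of_pos (p := Pb s i) hc]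
      show (if ((L0 : Nat) : Int) > lg then ((L0 : Nat) : Int) else lg) = max lg ((L0 : Nat) : Int)
      split <;> omega
    · rw [if_neg (fun h => hc ((row_cond s i L0 hi hL0 (by omega)).mp h))]
      rw [List.find?_cons_of_neg (p := Pb s i) (by simpa using hc)]
      have hc1 : ((L0 : Int) + 1) = ((L0 + 1 : Nat) : Int) := by push_cast; ring
      rw [hc1, ih (L0 + 1) (by omega) (by omega)]

theorem innerB_spec (s : List Char) (i : Nat) (lg : Int) (hi : i < s.length) :
    pvInnerB (rowFor s i) (i : Int) lg
        (PySem.List.pyRange 2 (PySem.Int.floordiv ((s.length : Int) - (i : Int)) 2 + 1) 1)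
      = gstep s lg i := by
  have hd : ((s.length : Int) - (i : Int)) = ((s.length - i : Nat) : Int) := by omega
  have hf : PySem.Int.floordiv ((s.length : Int) - (i : Int)) 2 + 1
      = (((s.length - i) / 2 + 1 : Nat) : Int) := by
    rw [hd, show (2 : Int) = ((2 : Nat) : Int) by rfl, PySem.Int.floordiv_natCast]
    push_cast; ring
  rw [hf]
  by_cases hsmall : (s.length - i) / 2 + 1 ≤ 2
  · rw [show (2 : Int) = ((2 : Nat) : Int) by rfl,
        PySem.List.pyRange_one_eq_nil (by exact_mod_cast hsmall)]
    unfold gstep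
    rw [show (s.length - i) / 2 - 1 = 0 by omega]
    simp [pvInnerB]
  · rw [show (2 : Int) = ((2 : Nat) : Int) by rfl,
        innerB_go s i lg hi ((s.length - i) / 2 - 1) 2 (by omega) (by omega)]
    rfl

theorem gstep_rcomm (s : List Char) (lg : Int) (i j : Nat) :
    gstep s (gstep s lg i) j = gstep s (gstep s lg j) i := by
  unfold gstep
  cases h1 : (List.range' 2 ((s.length - i) / 2 - 1)).find? (Pb s i) <;>
    cases h2 : (List.range' 2 ((s.length - j) / 2 - 1)).find? (Pb s j) <;>
    simp <;> omega

theorem foldl_gstep_out (s : List Char) : ∀ (l : List Nat) (lg : Int) (i : Nat),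
    l.foldl (gstep s) (gstep s lg i) = gstep s (l.foldl (gstep s) lg) i := by
  intro l
  induction l with
  | nil => intro lg i; rfl
  | cons a l ih =>
    intro lg i
    simp only [List.foldl_cons]
    rw [gstep_rcomm, ih]

theorem foldl_gstep_reverse (s : List Char) : ∀ (l : List Nat) (lg : Int),
    l.reverse.foldl (gstep s) lg = l.foldl (gstep s) lg := by
  intro l
  induction l with
  | nil => intro lg; rfl
  | cons a l ih =>
    intro lg
    simp only [List.reverse_cons, List.foldl_append, List.foldl_cons, List.foldl_nil, ih]
    rw [← foldl_gstep_out]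

theorem outerB (s : List Char) : ∀ (m : Nat), m ≤ s.length → ∀ (lg : Int),
    ((PySem.List.pyRange ((m : Int) - 1) (-1) (-1)).foldl
      (fun (st : Int × List Int) i =>
        let nxt := st.2
        let row := ((PySem.List.pyRange 0 ((s.length : Int)) 1).map
            (fun j => if PySem.List.pyGetD s i ' ' = PySem.List.pyGetD s j ' '
                      then PySem.List.pyGetD nxt (j + 1) 0 + 1 else 0)) ++ [0]
        let longest := pvInnerB row i st.1
          (PySem.List.pyRange 2 (PySem.Int.floordiv ((s.length : Int) - i) 2 + 1) 1)
        (longest, row))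
      (lg, rowFor s m)).1
    = ((List.range m).reverse).foldl (gstep s) lg := by
  intro m
  induction m with
  | zero =>
    intro _ lg
    rw [show ((0 : Nat) : Int) - 1 = (-1 : Int) by norm_num,
        PySem.List.pyRange_neg_one_eq_nil (le_refl _)]
    rfl
  | succ m ih =>
    intro hm lg
    have hmn : m < s.length := by omega
    rw [show ((m + 1 : Nat) : Int) - 1 = ((m : Nat) : Int) by push_cast; ring,
        PySem.List.pyRange_neg_one_cons (by omega)]
    simp only [List.foldl_cons]
    rw [rowStep s m hmn, innerB_spec s m lg hmn]
    rw [ih (by omega) (gstep s lg m)]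
    rw [List.range_succ, List.reverse_append]
    simp

-- ===== VERDICT (by name: the statement is the Claim_ definition above) =====
theorem length_of_pattern_spec : Claim_equal_length_of_pattern := by
  intro pattern _
  unfold Spec_length_of_pattern
  show length_of_pattern pattern = length_of_pattern_alt pattern
  simp only [length_of_pattern, length_of_pattern_alt]
  rw [← rowFor_top pattern.toList, outerB pattern.toList pattern.toList.length (le_refl _) 0]
  rw [PySem.List.pyRange_zero_nat, List.foldl_map]
  rw [PySem.List.foldl_congr_mem (List.range pattern.toList.length) _
    (gstep pattern.toList) 0
    (fun acc x hx => innerA_spec pattern.toList x acc (List.mem_range.mp hx))]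
  rw [foldl_gstep_reverse]
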